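-- pv_equiv track=rewrite | github.com/crux-bphc/chronoscript | src/timetables.py | separate_sections_into_types
-- ===== SOURCE A (Python) =====
-- from typing import Annotated
--
-- def separate_sections_into_types(
--     filtered_json: Annotated[
--         dict, "filtered json file, i.e, with only courses selected"
--     ]
-- ) -> dict:
--     """
--     Function to separate the sections into lectures, tutorials and practicals
--
--     Args:
--         filtered_json (dict): filtered json file, i.e, with only courses selected
--
--     Returns:
--         dict: dictionary of courses' sections separated into lectures, tutorials and practicals
--     """
--     sep = {}
--
--     for type in filtered_json:
--         sep[type] = {}
--         for course in filtered_json[type]: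
--             lectures = []
--             tutorials = []
--             practicals = []
--             # inner dictionary we'll be continuously referring to
--             ref = filtered_json[type][course]
--             for section in ref["sections"]:
--                 if section.startswith("L"):
--                     lectures.append(section)
--                 elif section.startswith("T"):
--                     tutorials.append(section)
--                 elif section.startswith("P"):
--                     practicals.append(section)
--             sep[type][course] = {
--                 "L": lectures,
--                 "T": tutorials,
--                 "P": practicals,
--             }
--             # if list is empty remove the key-value pair
--             # we need to remove it as it causes problems when using woth itertools.product()
--             if not lectures:
--                 del sep[type][course]["L"]
--             if not tutorials:
--                 del sep[type][course]["T"]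
--             if not practicals:
--                 del sep[type][course]["P"]
--     return sep
-- ===== SOURCE B (Python) =====
-- def separate_sections_into_types(filtered_json):
--     return {
--         type_: {
--             course: {
--                 prefix: group
--                 for prefix in "LTP"
--                 if (group := [s for s in info["sections"] if s.startswith(prefix)])
--             }
--             for course, info in courses.items()
--         }
--         for type_, courses in filtered_json.items()
--     }
-- ===== Notes on version B (the rewrite author's own statement) =====
-- stated objective: simpler
-- what changed: A single nested dict comprehension builds each course's pruned buckets directly by filtering the section list once per prefix 'L'/'T'/'P', instead of one pass accumulating three explicit lists, assembling a full three-key dict, and deleting the empty entries afterwards.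
import Mathlib
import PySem

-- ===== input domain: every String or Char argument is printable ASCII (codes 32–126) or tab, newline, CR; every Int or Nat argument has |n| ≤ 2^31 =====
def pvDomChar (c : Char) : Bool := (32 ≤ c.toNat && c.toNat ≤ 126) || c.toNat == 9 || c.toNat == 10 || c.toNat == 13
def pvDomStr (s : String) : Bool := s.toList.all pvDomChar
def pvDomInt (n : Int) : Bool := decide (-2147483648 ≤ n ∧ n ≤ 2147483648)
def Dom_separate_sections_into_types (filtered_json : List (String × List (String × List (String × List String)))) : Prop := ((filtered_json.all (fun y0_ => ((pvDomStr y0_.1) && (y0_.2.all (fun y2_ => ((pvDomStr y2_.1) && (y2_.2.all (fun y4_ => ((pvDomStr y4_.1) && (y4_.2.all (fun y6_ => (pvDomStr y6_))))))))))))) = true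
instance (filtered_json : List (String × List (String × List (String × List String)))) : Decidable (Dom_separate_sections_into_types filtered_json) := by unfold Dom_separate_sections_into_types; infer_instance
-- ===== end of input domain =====

-- B replaces A's three accumulator lists + build-then-delete with a nested comprehension
-- that filters the section list once per prefix; objective: simpler.

-- dict lookup ref["sections"]: first match; the default [] is never reached under
-- Pre_separate_sections_into_types, which excludes the KeyError case (missing key).
def pvLookupSections (ref : List (String × List String)) : List String :=
  ((ref.find? (fun p => p.1 == "sections")).map (·.2)).getD []

-- ===== PORT A =====
-- the inner loop over ref["sections"]: three lists accumulated in one pass (elif chain)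
def pvBucketsA (secs : List String) : List String × List String × List String :=
  secs.foldl (fun acc s =>
    if PySem.Str.startswith s "L" then (acc.1 ++ [s], acc.2.1, acc.2.2)
    else if PySem.Str.startswith s "T" then (acc.1, acc.2.1 ++ [s], acc.2.2)
    else if PySem.Str.startswith s "P" then (acc.1, acc.2.1, acc.2.2 ++ [s])
    else acc) ([], [], [])

-- per course: build the full {"L": …, "T": …, "P": …} dict, then `del` the empty entries
def pvCourseA (ref : List (String × List String)) : List (String × List String) :=
  let b := pvBucketsA (pvLookupSections ref)
  let d : List (String × List String) := [("L", b.1), ("T", b.2.1), ("P", b.2.2)]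
  let d := if b.1.isEmpty then d.eraseP (fun p => p.1 == "L") else d
  let d := if b.2.1.isEmpty then d.eraseP (fun p => p.1 == "T") else d
  let d := if b.2.2.isEmpty then d.eraseP (fun p => p.1 == "P") else d
  d

def separate_sections_into_types (filtered_json : List (String × List (String × List (String × List String)))) : List (String × List (String × List (String × List String))) :=
  -- sep = {}; for type in filtered_json: sep[type] = {}; for course …: sep[type][course] = …
  filtered_json.foldl (fun sep tc =>
    sep ++ [(tc.1, tc.2.foldl (fun inner ci => inner ++ [(ci.1, pvCourseA ci.2)]) [])]) []

-- ===== PORT B =====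
-- per course: {p: group for p in "LTP" if (group := [s for s in sections if s.startswith(p)])}
def pvCourseB (ref : List (String × List String)) : List (String × List String) :=
  (["L", "T", "P"] : List String).filterMap (fun p =>
    let group := (pvLookupSections ref).filter (fun s => PySem.Str.startswith s p)
    if group.isEmpty then none else some (p, group))

def separate_sections_into_types_alt (filtered_json : List (String × List (String × List (String × List String)))) : List (String × List (String × List (String × List String))) :=
  filtered_json.map (fun tc => (tc.1, tc.2.map (fun ci => (ci.1, pvCourseB ci.2))))

-- ===== PRECONDITION & SPEC =====
-- Pre_ excludes exactly the inputs on which Python A raises KeyError: a course whose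
-- inner dict has no "sections" key.
def Pre_separate_sections_into_types (filtered_json : List (String × List (String × List (String × List String)))) : Prop :=
  (filtered_json.all (fun tc => tc.2.all (fun ci => ci.2.any (fun kv => kv.1 == "sections")))) = true

instance (filtered_json : List (String × List (String × List (String × List String)))) : Decidable (Pre_separate_sections_into_types filtered_json) := by unfold Pre_separate_sections_into_types; infer_instance

def pvWitness_separate_sections_into_types : (List (String × List (String × List (String × List String)))) :=
  [("CDCs", [("CS F111", [("sections", ["L1", "L2", "T1", "P1", "X1"])]), ("BIO F110", [("sections", [])])])]

def Spec_separate_sections_into_types (filtered_json : List (String × List (String × List (String × List String)))) (out : List (String × List (String × List (String × List String)))) : Prop := out = separate_sections_into_types_alt filtered_json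
instance (filtered_json : List (String × List (String × List (String × List String)))) (out : List (String × List (String × List (String × List String)))) : Decidable (Spec_separate_sections_into_types filtered_json out) := by unfold Spec_separate_sections_into_types; infer_instance

-- ===== CLAIM (what is proved, stated in full; the proofs are below) =====
def Claim_equal_separate_sections_into_types : Prop := ∀ (filtered_json : List (String × List (String × List (String × List String)))), Dom_separate_sections_into_types filtered_json → Pre_separate_sections_into_types filtered_json → Spec_separate_sections_into_types filtered_json (separate_sections_into_types filtered_json)

-- ===== LEMMAS AND PROOFS =====

-- two distinct single-character prefixes cannot both be prefixes of the same string
theorem pv_chars_excl (p q : List Char) (l : List Char) (hne : p ≠ q)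
    (hp : p.length = 1) (hq : q.length = 1)
    (ha : PySem.Chars.startswith l p = true) : PySem.Chars.startswith l q = false := by
  rw [PySem.Chars.startswith_iff] at ha
  by_contra h
  rw [Bool.not_eq_false, PySem.Chars.startswith_iff] at h
  rcases p with _ | ⟨a, _ | _⟩ <;> rcases q with _ | ⟨b, _ | _⟩ <;> simp_all
  rcases l with _ | ⟨x, l⟩
  · simp at ha
  · rcases ha with ⟨t, ht⟩
    rcases h with ⟨u, hu⟩
    simp at ht hu
    apply hne
    simp [ht.1, hu.1]

theorem pv_sw_excl (s : String) (a b : String) (hne : a.toList ≠ b.toList)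
    (hp : a.toList.length = 1) (hq : b.toList.length = 1)
    (ha : PySem.Str.startswith s a = true) : PySem.Str.startswith s b = false := by
  rw [PySem.Str.startswith_eq] at ha ⊢
  exact pv_chars_excl _ _ _ hne hp hq ha

-- the one-pass three-accumulator fold equals three independent filters
theorem pvBucketsA_eq_filters (secs : List String) (l t p : List String) :
    secs.foldl (fun acc s =>
      if PySem.Str.startswith s "L" then (acc.1 ++ [s], acc.2.1, acc.2.2)
      else if PySem.Str.startswith s "T" then (acc.1, acc.2.1 ++ [s], acc.2.2)
      else if PySem.Str.startswith s "P" then (acc.1, acc.2.1, acc.2.2 ++ [s])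
      else acc) (l, t, p)
    = (l ++ secs.filter (fun s => PySem.Str.startswith s "L"),
       t ++ secs.filter (fun s => PySem.Str.startswith s "T"),
       p ++ secs.filter (fun s => PySem.Str.startswith s "P")) := by
  induction secs generalizing l t p with
  | nil => simp
  | cons s ss ih =>
    by_cases hL : PySem.Str.startswith s "L" = true
    · have hT := pv_sw_excl s "L" "T" (by decide) (by decide) (by decide) hL
      have hP := pv_sw_excl s "L" "P" (by decide) (by decide) (by decide) hL
      simp only [List.foldl_cons, List.filter_cons, hL, hT, hP, Bool.false_eq_true,
        eq_self_iff_true, if_true, if_false]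
      rw [ih]
      simp
    · rw [Bool.not_eq_true] at hL
      by_cases hT : PySem.Str.startswith s "T" = true
      · have hP := pv_sw_excl s "T" "P" (by decide) (by decide) (by decide) hT
        simp only [List.foldl_cons, List.filter_cons, hL, hT, hP, Bool.false_eq_true,
          eq_self_iff_true, if_true, if_false]
        rw [ih]
        simp
      · rw [Bool.not_eq_true] at hT
        by_cases hP : PySem.Str.startswith s "P" = true
        · simp only [List.foldl_cons, List.filter_cons, hL, hT, hP, Bool.false_eq_true,
            eq_self_iff_true, if_true, if_false]
          rw [ih]
          simp
        · rw [Bool.not_eq_true] at hP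
          simp only [List.foldl_cons, List.filter_cons, hL, hT, hP, Bool.false_eq_true,
            eq_self_iff_true, if_true, if_false]
          exact ih l t p

-- per-course: build-then-delete equals the filtered comprehension
theorem pvCourse_eq (ref : List (String × List String)) : pvCourseA ref = pvCourseB ref := by
  unfold pvCourseA pvCourseB pvBucketsA
  rw [pvBucketsA_eq_filters]
  simp only [List.nil_append, List.filterMap_cons, List.filterMap_nil]
  generalize (pvLookupSections ref).filter (fun s => PySem.Str.startswith s "L") = ls
  generalize (pvLookupSections ref).filter (fun s => PySem.Str.startswith s "T") = ts
  generalize (pvLookupSections ref).filter (fun s => PySem.Str.startswith s "P") = ps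
  cases ls <;> cases ts <;> cases ps <;> simp [List.eraseP_cons]

-- ===== VERDICT (by name: the statement is the Claim_ definition above) =====
theorem separate_sections_into_types_spec : Claim_equal_separate_sections_into_types := by
  intro fj _hDom _hPre
  show _ = _
  unfold separate_sections_into_types separate_sections_into_types_alt
  rw [PySem.List.foldl_append_singleton_eq_map]
  simp only [List.nil_append]
  apply List.map_congr_left
  intro tc _
  rw [PySem.List.foldl_append_singleton_eq_map]
  simp only [List.nil_append]
  congr 1
  apply List.map_congr_left
  intro ci _
  rw [pvCourse_eq]
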